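-- pv_equiv track=rewrite | github.com/JuhiSrivastava/Algorithms-on-Strings | C4 - Week1/trie_matching1.py | solve
-- ===== SOURCE A (Python) =====
-- def trie_matching(text,tree):
--     currentNode = 0
--     for j in range(len(text)):
--         if currentNode in tree.keys():
--             if text[j] in tree[currentNode].keys():
--                 currentNode = tree[currentNode][text[j]]
--             else:
--                 return False
--         if j == len(text) -1 and currentNode in tree.keys():
--             return False
--     return True
--
-- def build_trie(patterns):
--     tree = dict()
--     maxNode = 0
--     for i in patterns:
--         currentNode = 0
--         for j in range(len(i)):
--             if currentNode not in tree.keys():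
--                 tree[currentNode] = dict()
--                 maxNode = maxNode + 1
--                 tree[currentNode][i[j]] = maxNode
--             else:
--                 if i[j] not in tree[currentNode].keys():
--                     maxNode = maxNode + 1
--                     tree[currentNode][i[j]] = maxNode
--             currentNode = tree[currentNode][i[j]]
--     return tree
--
-- def solve (text, n, patterns):
--     tree = build_trie(patterns)
--     result = []
--     i = 0
--     while len(text) > 0:
--         if trie_matching(text,tree):
--             result.append(i)
--         i = i+1
--         text = text[1:]
--     return result
-- ===== SOURCE B (Python) =====
-- # Trie-free matching: only patterns that no other pattern strictly extends can
-- # end at a leaf, so a position matches iff one of them is a prefix of the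
-- # suffix starting there; a prefix set replaces any pairwise scan.
-- def solve(text, n, patterns):
--     proper_prefixes = {q[:j] for q in patterns for j in range(len(q))}
--     terminals = tuple({p for p in patterns if p not in proper_prefixes})
--     return [i for i in range(len(text)) if text.startswith(terminals, i)]
-- ===== Notes on version B (the rewrite author's own statement) =====
-- stated objective: simpler
-- what changed: Replaces the mutable integer-node trie plus per-suffix trie walk by direct prefix tests: a set of all proper prefixes yields the 'terminal' patterns (those no other pattern strictly extends) in one hashed pass, and position i is reported iff some terminal pattern is a prefix of text[i:].
-- intended difference: When patterns is the empty list and text is non-empty, A returns every position 0..len(text)-1 (its empty trie matches every suffix trivially), while B returns [], the intended answer when there are no patterns to match. — e.g. on solve("ab", 0, []): A returns [0, 1], B returns []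
import Mathlib
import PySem

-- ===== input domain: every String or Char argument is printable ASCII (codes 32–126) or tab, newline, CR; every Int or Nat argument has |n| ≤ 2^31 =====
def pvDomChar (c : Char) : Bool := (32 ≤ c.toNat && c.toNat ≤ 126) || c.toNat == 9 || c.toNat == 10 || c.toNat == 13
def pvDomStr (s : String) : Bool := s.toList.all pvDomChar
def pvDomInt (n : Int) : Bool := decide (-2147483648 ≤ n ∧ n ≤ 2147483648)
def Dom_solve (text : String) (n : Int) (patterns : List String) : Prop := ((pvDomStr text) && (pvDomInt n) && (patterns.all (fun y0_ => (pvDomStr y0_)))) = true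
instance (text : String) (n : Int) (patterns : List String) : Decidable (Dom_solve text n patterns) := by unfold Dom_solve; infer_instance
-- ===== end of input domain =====

-- B replaces A's integer-node trie and per-suffix trie walk by direct prefix tests
-- against the "terminal" patterns (objective: simpler); on the empty pattern list with
-- non-empty text A returns every position and B returns [] (stated as D_solve).


-- ===== PORT A =====
-- tree : dict[int, dict[char, int]]
abbrev PvTrie := PySem.Dict Int (PySem.Dict Char Int)

-- one iteration of build_trie's inner loop, the part that updates (tree, maxNode)
def pvBuildStep (tree : PvTrie) (maxNode cur : Int) (c : Char) : PvTrie × Int :=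
  match tree.get? cur with
  | none =>
      -- tree[currentNode] = dict(); maxNode += 1; tree[currentNode][i[j]] = maxNode
      (tree.insert cur (PySem.Dict.empty.insert c (maxNode + 1)), maxNode + 1)
  | some d =>
      match d.get? c with
      | none => (tree.insert cur (d.insert c (maxNode + 1)), maxNode + 1)
      | some _ => (tree, maxNode)

-- the whole loop body: update, then currentNode = tree[currentNode][i[j]]
def pvBuildChar (st : PvTrie × Int × Int) (c : Char) : PvTrie × Int × Int :=
  let r := pvBuildStep st.1 st.2.1 st.2.2 c
  (r.1, r.2, ((r.1.get? st.2.2).getD PySem.Dict.empty).getD c 0)  -- the lookup always succeeds here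

def pvBuildTrie (patterns : List String) : PvTrie :=
  (patterns.foldl
    (fun st p =>
      let r := p.toList.foldl pvBuildChar (st.1, st.2, 0)  -- currentNode = 0
      (r.1, r.2.1))
    (PySem.Dict.empty, 0)).1

-- trie_matching(text, tree) with currentNode threaded; 'j == len(text)-1' is 'rest = []'
def pvMatch (tree : PvTrie) : List Char → Int → Bool
  | [], _ => true
  | c :: rest, cur =>
      match tree.get? cur with
      | none =>
          if rest.isEmpty then !(tree.get? cur).isSome else pvMatch tree rest cur
      | some d =>
          match d.get? c with
          | none => false
          | some nxt =>
              if rest.isEmpty then !(tree.get? nxt).isSome else pvMatch tree rest nxt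

-- while len(text) > 0: … ; i += 1; text = text[1:]
def pvLoopA (tree : PvTrie) : List Char → Int → List Int
  | [], _ => []
  | c :: rest, i =>
      (if pvMatch tree (c :: rest) 0 then [i] else []) ++ pvLoopA tree rest (i + 1)

def solve (text : String) (n : Int) (patterns : List String) : List Int :=
  pvLoopA (pvBuildTrie patterns) text.toList 0

-- ===== PORT B =====
-- {q[:j] for q in pats for j in range(len(q))}
def pvProperPrefixes (pats : List (List Char)) : PySem.Set (List Char) :=
  PySem.Set.ofList (pats.flatMap (fun q => (List.range q.length).map (fun j => q.take j)))

-- tuple({p for p in pats if p not in proper_prefixes}); elements only consumed by 'any'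
def pvTerminals (pats : List (List Char)) : List (List Char) :=
  PySem.Set.ofList (pats.filter (fun p => !(PySem.Set.contains (pvProperPrefixes pats) p)))

def solve_alt (text : String) (n : Int) (patterns : List String) : List Int :=
  let terms := pvTerminals (patterns.map String.toList)
  (PySem.List.pyRange 0 (text.toList.length : Int) 1).filter
    (fun i => terms.any (fun p => p.isPrefixOf (text.toList.drop i.toNat)))

-- ===== PRECONDITION & SPEC =====
-- When patterns is the empty list and text is non-empty, A returns every position
-- 0..len(text)-1 (its empty trie matches every suffix trivially), while B returns [],
-- the intended answer when there are no patterns to match.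
def D_solve (text : String) (n : Int) (patterns : List String) : Prop :=
  patterns = [] ∧ text ≠ ""
instance (text : String) (n : Int) (patterns : List String) : Decidable (D_solve text n patterns) := by unfold D_solve; infer_instance

def Spec_solve (text : String) (n : Int) (patterns : List String) (out : List Int) : Prop := ¬ D_solve text n patterns → out = solve_alt text n patterns
instance (text : String) (n : Int) (patterns : List String) (out : List Int) : Decidable (Spec_solve text n patterns out) := by unfold Spec_solve; infer_instance

def pvDiffWitness_solve : String × Int × List String := ("ab", 0, [])
def pvDiffWitnessOut_solve : (List Int) × (List Int) := ([0, 1], [])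

-- ===== CLAIM (what is proved, stated in full; the proofs are below) =====
def Claim_unchanged_solve : Prop := ∀ (text : String) (n : Int) (patterns : List String), Dom_solve text n patterns → Spec_solve text n patterns (solve text n patterns)
def Claim_changed_solve : Prop := Dom_solve (pvDiffWitness_solve.1) (pvDiffWitness_solve.2.1) (pvDiffWitness_solve.2.2) ∧ D_solve (pvDiffWitness_solve.1) (pvDiffWitness_solve.2.1) (pvDiffWitness_solve.2.2) ∧ solve (pvDiffWitness_solve.1) (pvDiffWitness_solve.2.1) (pvDiffWitness_solve.2.2) = pvDiffWitnessOut_solve.1 ∧ solve_alt (pvDiffWitness_solve.1) (pvDiffWitness_solve.2.1) (pvDiffWitness_solve.2.2) = pvDiffWitnessOut_solve.2 ∧ pvDiffWitnessOut_solve.1 ≠ pvDiffWitnessOut_solve.2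
def Claim_exact_solve : Prop := ∀ (text : String) (n : Int) (patterns : List String), Dom_solve text n patterns → D_solve text n patterns → solve text n patterns ≠ solve_alt text n patterns

-- ===== LEMMAS AND PROOFS =====

-- ---------- proof-side notions: walking the trie, node/child predicates ----------

-- one trie-walk step: from node id, follow edge labelled c
def pvStepT (tree : PvTrie) (acc : Option Int) (c : Char) : Option Int :=
  acc.bind fun id => (tree.get? id).bind fun d => d.get? c

-- the node id reached from the root by reading s (none: no such node)
def pvReach (tree : PvTrie) (s : List Char) : Option Int := s.foldl (pvStepT tree) (some 0)

-- s labels a node of the trie of P (the root [] or a nonempty prefix of some p ∈ P)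
def pvNode (P : List (List Char)) (s : List Char) : Prop := s = [] ∨ ∃ p ∈ P, s <+: p

-- the node s has a child (s is a strict prefix of some p ∈ P)
def pvChild (P : List (List Char)) (s : List Char) : Prop := ∃ p ∈ P, s <+: p ∧ s ≠ p

-- the build invariant: tree represents exactly the trie of P, ids bounded by maxNode
def pvInv (tree : PvTrie) (maxNode : Int) (P : List (List Char)) : Prop :=
  (∀ s, (pvReach tree s).isSome = true ↔ pvNode P s) ∧
  (∀ s id, pvReach tree s = some id → ((tree.get? id).isSome = true ↔ pvChild P s)) ∧
  (∀ s id, pvReach tree s = some id → id ≤ maxNode) ∧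
  (∀ s t id, pvReach tree s = some id → pvReach tree t = some id → s = t) ∧
  (∀ id, (tree.get? id).isSome = true → id ≤ maxNode)

lemma pvReach_nil (tree : PvTrie) : pvReach tree [] = some 0 := rfl

lemma pvReach_append (tree : PvTrie) (s : List Char) (c : Char) :
    pvReach tree (s ++ [c]) = pvStepT tree (pvReach tree s) c := by
  simp [pvReach, List.foldl_append]

lemma foldl_stepT_none (tree : PvTrie) (u : List Char) :
    u.foldl (pvStepT tree) none = none := by
  induction u with
  | nil => rfl
  | cons c u ih => simpa [pvStepT] using ih

lemma pvNode_of_prefix {P : List (List Char)} {x y : List Char} (h : y <+: x)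
    (hx : pvNode P x) : pvNode P y := by
  rcases hx with rfl | ⟨p, hp, hpre⟩
  · exact Or.inl (List.prefix_nil.mp h)
  · rcases eq_or_ne y [] with rfl | hy
    · exact Or.inl rfl
    · exact Or.inr ⟨p, hp, h.trans hpre⟩

lemma pvNode_snoc (done : List (List Char)) (t : List Char) (c : Char) (s : List Char) :
    pvNode (done ++ [t ++ [c]]) s ↔ pvNode (done ++ [t]) s ∨ s = t ++ [c] := by
  constructor
  · rintro (rfl | ⟨p, hp, hpre⟩)
    · exact Or.inl (Or.inl rfl)
    · rcases List.mem_append.mp hp with h | h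
      · exact Or.inl (Or.inr ⟨p, List.mem_append.mpr (Or.inl h), hpre⟩)
      · simp only [List.mem_singleton] at h
        subst h
        rcases List.prefix_concat_iff.mp hpre with rfl | hpre'
        · exact Or.inr rfl
        · exact Or.inl (Or.inr ⟨t, by simp, hpre'⟩)
  · rintro (h | rfl)
    · rcases h with rfl | ⟨p, hp, hpre⟩
      · exact Or.inl rfl
      · rcases List.mem_append.mp hp with h | h
        · exact Or.inr ⟨p, by simp [h], hpre⟩
        · simp only [List.mem_singleton] at h
          exact Or.inr ⟨t ++ [c], by simp, (h ▸ hpre).trans (List.prefix_append t [c])⟩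
    · exact Or.inr ⟨t ++ [c], by simp, List.prefix_rfl⟩

lemma pvChild_snoc (done : List (List Char)) (t : List Char) (c : Char) (s : List Char) :
    pvChild (done ++ [t ++ [c]]) s ↔ pvChild (done ++ [t]) s ∨ s = t := by
  constructor
  · rintro ⟨p, hp, hpre, hne⟩
    rcases List.mem_append.mp hp with h | h
    · exact Or.inl ⟨p, by simp [h], hpre, hne⟩
    · simp only [List.mem_singleton] at h
      subst h
      rcases List.prefix_concat_iff.mp hpre with rfl | hpre'
      · exact absurd rfl hne
      · rcases eq_or_ne s t with rfl | hst
        · exact Or.inr rfl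
        · exact Or.inl ⟨t, by simp, hpre', hst⟩
  · rintro (⟨p, hp, hpre, hne⟩ | heq)
    · rcases List.mem_append.mp hp with h | h
      · exact ⟨p, by simp [h], hpre, hne⟩
      · simp only [List.mem_singleton] at h
        refine ⟨t ++ [c], by simp, (h ▸ hpre).trans (List.prefix_append t [c]), ?_⟩
        intro he
        have hl := hpre.length_le
        rw [h] at hl
        rw [he] at hl
        simp at hl
    · refine ⟨t ++ [c], by simp, by rw [heq]; exact List.prefix_append t [c], ?_⟩
      intro he
      have := congrArg List.length (heq.symm.trans he)
      simp at this

lemma pvNode_empty_pat (P : List (List Char)) (s : List Char) :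
    pvNode (P ++ [[]]) s ↔ pvNode P s := by
  constructor
  · rintro (rfl | ⟨p, hp, hpre⟩)
    · exact Or.inl rfl
    · rcases List.mem_append.mp hp with h | h
      · exact Or.inr ⟨p, h, hpre⟩
      · simp only [List.mem_singleton] at h
        subst h
        exact Or.inl (List.prefix_nil.mp hpre)
  · rintro (rfl | ⟨p, hp, hpre⟩)
    · exact Or.inl rfl
    · exact Or.inr ⟨p, by simp [hp], hpre⟩

lemma pvChild_empty_pat (P : List (List Char)) (s : List Char) :
    pvChild (P ++ [[]]) s ↔ pvChild P s := by
  constructor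
  · rintro ⟨p, hp, hpre, hne⟩
    rcases List.mem_append.mp hp with h | h
    · exact ⟨p, h, hpre, hne⟩
    · simp only [List.mem_singleton] at h
      subst h
      exact absurd (List.prefix_nil.mp hpre) hne
  · rintro ⟨p, hp, hpre, hne⟩
    exact ⟨p, by simp [hp], hpre, hne⟩

lemma pvInv_congr {tree : PvTrie} {m : Int} {P P' : List (List Char)}
    (hn : ∀ s, pvNode P s ↔ pvNode P' s) (hc : ∀ s, pvChild P s ↔ pvChild P' s)
    (h : pvInv tree m P) : pvInv tree m P' := by
  obtain ⟨h1, h2, h3, h4, h5⟩ := h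
  exact ⟨fun s => (h1 s).trans (hn s),
         fun s id hr => (h2 s id hr).trans (hc s),
         h3, h4, h5⟩

-- how pvReach changes when a fresh child edge c ↦ maxNode+1 is added below node t
lemma pvReach_insert {tree : PvTrie} {maxNode : Int} {P : List (List Char)}
    (hInv : pvInv tree maxNode P) {t : List Char} {cur : Int}
    (hr : pvReach tree t = some cur) (d0 : PySem.Dict Char Int)
    (hd0 : ∀ c', d0.get? c' = pvReach tree (t ++ [c'])) (c : Char) :
    ∀ s, pvReach (tree.insert cur (d0.insert c (maxNode + 1))) s =
      if t ++ [c] <+: s then (if s = t ++ [c] then some (maxNode + 1) else none)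
      else pvReach tree s := by
  obtain ⟨h1, h2, h3, h4, h5⟩ := hInv
  have hcur : cur ≤ maxNode := h3 t cur hr
  have hmkey : tree.get? (maxNode + 1) = none := by
    cases hk : tree.get? (maxNode + 1) with
    | none => rfl
    | some d => have := h5 (maxNode + 1) (by simp [hk]); omega
  intro s
  induction s using List.reverseRecOn with
  | nil =>
      have hnp : ¬ (t ++ [c] <+: ([] : List Char)) := by
        intro h
        have := h.length_le
        simp at this
      simp [hnp, pvReach_nil]
  | append_singleton u c' ih =>
      rw [pvReach_append, ih]
      by_cases h1p : t ++ [c] <+: u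
      · have hne : (maxNode + 1) ≠ cur := by omega
        have hm' : (tree.insert cur (d0.insert c (maxNode + 1))).get? (maxNode + 1) = none := by
          rw [PySem.Dict.get?_insert, if_neg hne]; exact hmkey
        have hc1 : t ++ [c] <+: u ++ [c'] := h1p.trans (List.prefix_append _ _)
        have hc2 : u ++ [c'] ≠ t ++ [c] := by
          intro he
          have hl := h1p.length_le
          have hlen := congrArg List.length he
          simp at hl hlen
          omega
        by_cases h2p : u = t ++ [c]
        · subst h2p
          simp [pvStepT, hm']
        · simp [pvStepT, h1p, h2p, hc1, hc2]
      · cases hru : pvReach tree u with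
        | none =>
            have hcond : ¬ (t ++ [c] <+: u ++ [c']) := by
              intro hcon
              rcases List.prefix_concat_iff.mp hcon with he | hp'
              · have hu : u = t := by
                  have h' := congrArg List.dropLast he
                  simp at h'
                  exact h'.symm
                rw [hu, hr] at hru
                cases hru
              · exact h1p hp'
            simp [pvStepT, h1p, hru, hcond, pvReach_append]
        | some id =>
            by_cases hid : id = cur
            · have hu : u = t := h4 u t id hru (by rw [hid]; exact hr)
              subst hid
              subst hu
              have htc' : (tree.insert id (d0.insert c (maxNode + 1))).get? id
                  = some (d0.insert c (maxNode + 1)) := PySem.Dict.get?_insert_self _ _ _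
              by_cases hcc : c' = c
              · subst hcc
                simp [pvStepT, h1p, htc', PySem.Dict.get?_insert_self, List.prefix_rfl]
              · have hcond : ¬ (u ++ [c] <+: u ++ [c']) := by
                  intro hcon
                  rcases List.prefix_concat_iff.mp hcon with he | hp'
                  · have := List.append_cancel_left he
                    simp at this
                    exact hcc this.symm
                  · have := hp'.length_le
                    simp at this
                have hd' : (d0.insert c (maxNode + 1)).get? c' = d0.get? c' := by
                  rw [PySem.Dict.get?_insert, if_neg hcc]
                simp [pvStepT, h1p, hru, htc', hd', hd0 c', hcond, pvReach_append]
            · have htg : (tree.insert cur (d0.insert c (maxNode + 1))).get? id = tree.get? id := by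
                rw [PySem.Dict.get?_insert, if_neg hid]
              have hcond : ¬ (t ++ [c] <+: u ++ [c']) := by
                intro hcon
                rcases List.prefix_concat_iff.mp hcon with he | hp'
                · have hu : u = t := by
                    have h' := congrArg List.dropLast he
                    simp at h'
                    exact h'.symm
                  rw [hu, hr] at hru
                  exact hid (Option.some.inj hru).symm
                · exact h1p hp'
              simp [pvStepT, h1p, hru, htg, hcond, pvReach_append]

-- the invariant survives the fresh-edge insertion
lemma pvInv_insert {tree : PvTrie} {maxNode : Int} {done : List (List Char)} {t : List Char}
    (hInv : pvInv tree maxNode (done ++ [t])) {cur : Int}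
    (hr : pvReach tree t = some cur) (d0 : PySem.Dict Char Int)
    (hd0 : ∀ c', d0.get? c' = pvReach tree (t ++ [c'])) (c : Char)
    (hnew : pvReach tree (t ++ [c]) = none) :
    pvInv (tree.insert cur (d0.insert c (maxNode + 1))) (maxNode + 1) (done ++ [t ++ [c]]) := by
  have hre := pvReach_insert hInv hr d0 hd0 c
  obtain ⟨h1, h2, h3, h4, h5⟩ := hInv
  have hcur : cur ≤ maxNode := h3 t cur hr
  have hmkey : tree.get? (maxNode + 1) = none := by
    cases hk : tree.get? (maxNode + 1) with
    | none => rfl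
    | some d => have := h5 (maxNode + 1) (by simp [hk]); omega
  have hm' : (tree.insert cur (d0.insert c (maxNode + 1))).get? (maxNode + 1) = none := by
    rw [PySem.Dict.get?_insert, if_neg (by omega : (maxNode + 1) ≠ cur)]; exact hmkey
  have hnodenew : ¬ pvNode (done ++ [t]) (t ++ [c]) := by
    intro hn
    have := (h1 (t ++ [c])).mpr hn
    simp [hnew] at this
  have hget' : ∀ id : Int, id ≠ cur →
      (tree.insert cur (d0.insert c (maxNode + 1))).get? id = tree.get? id := by
    intro id hne
    rw [PySem.Dict.get?_insert, if_neg hne]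
  have key : ∀ x idx, pvReach (tree.insert cur (d0.insert c (maxNode + 1))) x = some idx →
      (x = t ++ [c] ∧ idx = maxNode + 1) ∨ pvReach tree x = some idx := by
    intro x idx hx
    rw [hre x] at hx
    by_cases b1 : t ++ [c] <+: x
    · by_cases b2 : x = t ++ [c]
      · rw [if_pos b1, if_pos b2] at hx
        exact Or.inl ⟨b2, (Option.some.inj hx).symm⟩
      · rw [if_pos b1, if_neg b2] at hx
        cases hx
    · rw [if_neg b1] at hx
      exact Or.inr hx
  refine ⟨?_, ?_, ?_, ?_, ?_⟩
  · intro s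
    rw [hre s, pvNode_snoc]
    by_cases hp1 : t ++ [c] <+: s
    · by_cases hp2 : s = t ++ [c]
      · simp [hp2]
      · have hnn : ¬ pvNode (done ++ [t]) s := by
          rintro (rfl | ⟨p, hp, hpre⟩)
          · have := hp1.length_le
            simp at this
          · exact hnodenew (Or.inr ⟨p, hp, hp1.trans hpre⟩)
        simp [hp1, hp2, hnn]
    · have hne2 : s ≠ t ++ [c] := fun he => hp1 (he ▸ List.prefix_rfl)
      simp [hp1, hne2, h1 s]
  · intro s id hrs
    rw [pvChild_snoc]
    rw [hre s] at hrs
    by_cases hp1 : t ++ [c] <+: s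
    · by_cases hp2 : s = t ++ [c]
      · rw [if_pos hp1, if_pos hp2] at hrs
        have hid : id = maxNode + 1 := (Option.some.inj hrs).symm
        have hnc : ¬ pvChild (done ++ [t]) s := by
          rintro ⟨p, hp, hpre, hne⟩
          exact hnodenew (Or.inr ⟨p, hp, hp2 ▸ hpre⟩)
        have hnt : s ≠ t := by
          intro he
          have := congrArg List.length (he.symm.trans hp2)
          simp at this
        simp [hid, hm', hnc, hnt]
      · rw [if_pos hp1, if_neg hp2] at hrs
        cases hrs
    · rw [if_neg hp1] at hrs
      by_cases hid : id = cur
      · have hs : s = t := h4 s t id hrs (by rw [hid]; exact hr)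
        rw [hid, PySem.Dict.get?_insert_self]
        simp [hs]
      · rw [hget' id hid]
        have hsne : s ≠ t := by
          intro he
          rw [he, hr] at hrs
          exact hid (Option.some.inj hrs).symm
        simp [h2 s id hrs, hsne]
  · intro s id hrs
    rcases key s id hrs with ⟨_, rfl⟩ | hs'
    · omega
    · have := h3 s id hs'
      omega
  · intro s s2 id hs hs2
    rcases key s id hs with ⟨e1, e2⟩ | hs' <;> rcases key s2 id hs2 with ⟨e3, e4⟩ | hs2'
    · rw [e1, e3]
    · rw [e2] at hs2'
      have := h3 s2 _ hs2'
      omega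
    · rw [e4] at hs'
      have := h3 s _ hs'
      omega
    · exact h4 s s2 id hs' hs2'
  · intro id hsome
    by_cases hid : id = cur
    · rw [hid]
      omega
    · rw [hget' id hid] at hsome
      have := h5 id hsome
      omega

-- one inner-loop iteration of build_trie preserves the invariant
lemma pvBuildChar_inv {tree : PvTrie} {maxNode cur : Int} {done : List (List Char)}
    {t : List Char} (c : Char)
    (hInv : pvInv tree maxNode (done ++ [t])) (hr : pvReach tree t = some cur) :
    pvInv (pvBuildChar (tree, maxNode, cur) c).1 (pvBuildChar (tree, maxNode, cur) c).2.1
      (done ++ [t ++ [c]]) ∧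
    pvReach (pvBuildChar (tree, maxNode, cur) c).1 (t ++ [c]) =
      some (pvBuildChar (tree, maxNode, cur) c).2.2 := by
  obtain ⟨h1, h2, h3, h4, h5⟩ := hInv
  cases htc : tree.get? cur with
  | none =>
      have hd0 : ∀ c', (PySem.Dict.empty : PySem.Dict Char Int).get? c' = pvReach tree (t ++ [c']) := by
        intro c'
        rw [pvReach_append, hr]
        simp [pvStepT, htc, PySem.Dict.get?_empty]
      have hnew : pvReach tree (t ++ [c]) = none := (hd0 c).symm.trans (PySem.Dict.get?_empty c)
      have hI := pvInv_insert ⟨h1, h2, h3, h4, h5⟩ hr PySem.Dict.empty hd0 c hnew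
      have hre := pvReach_insert ⟨h1, h2, h3, h4, h5⟩ hr PySem.Dict.empty hd0 c (t ++ [c])
      rw [if_pos List.prefix_rfl, if_pos rfl] at hre
      have hstep : pvBuildChar (tree, maxNode, cur) c =
          (tree.insert cur (PySem.Dict.empty.insert c (maxNode + 1)), maxNode + 1, maxNode + 1) := by
        simp [pvBuildChar, pvBuildStep, htc, PySem.Dict.get?_insert_self, PySem.Dict.getD_insert_self]
      rw [hstep]
      exact ⟨hI, hre⟩
  | some d =>
      cases hdc : d.get? c with
      | none =>
          have hd0 : ∀ c', d.get? c' = pvReach tree (t ++ [c']) := by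
            intro c'
            rw [pvReach_append, hr]
            simp [pvStepT, htc]
          have hnew : pvReach tree (t ++ [c]) = none := (hd0 c).symm.trans hdc
          have hI := pvInv_insert ⟨h1, h2, h3, h4, h5⟩ hr d hd0 c hnew
          have hre := pvReach_insert ⟨h1, h2, h3, h4, h5⟩ hr d hd0 c (t ++ [c])
          rw [if_pos List.prefix_rfl, if_pos rfl] at hre
          have hstep : pvBuildChar (tree, maxNode, cur) c =
              (tree.insert cur (d.insert c (maxNode + 1)), maxNode + 1, maxNode + 1) := by
            simp [pvBuildChar, pvBuildStep, htc, hdc, PySem.Dict.get?_insert_self,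
              PySem.Dict.getD_insert_self]
          rw [hstep]
          exact ⟨hI, hre⟩
      | some nxt =>
          have hreach_c : pvReach tree (t ++ [c]) = some nxt := by
            rw [pvReach_append, hr]
            simp [pvStepT, htc, hdc]
          have hstep : pvBuildChar (tree, maxNode, cur) c = (tree, maxNode, nxt) := by
            simp [pvBuildChar, pvBuildStep, htc, hdc, PySem.Dict.getD_eq_get?_getD]
          rw [hstep]
          refine ⟨?_, hreach_c⟩
          have hnode : pvNode (done ++ [t]) (t ++ [c]) := (h1 (t ++ [c])).mp (by simp [hreach_c])
          have hchild : pvChild (done ++ [t]) t := (h2 t cur hr).mp (by simp [htc])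
          refine pvInv_congr (fun s => ?_) (fun s => ?_) ⟨h1, h2, h3, h4, h5⟩
          · rw [pvNode_snoc]
            constructor
            · exact Or.inl
            · rintro (h | rfl)
              · exact h
              · exact hnode
          · rw [pvChild_snoc]
            constructor
            · exact Or.inl
            · rintro (h | rfl)
              · exact h
              · exact hchild

-- the whole inner loop over the pattern's characters
lemma pvBuildChars_inv (cs : List Char) : ∀ (tree : PvTrie) (maxNode cur : Int)
    (done : List (List Char)) (t : List Char),
    pvInv tree maxNode (done ++ [t]) → pvReach tree t = some cur →
    pvInv (cs.foldl pvBuildChar (tree, maxNode, cur)).1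
      (cs.foldl pvBuildChar (tree, maxNode, cur)).2.1 (done ++ [t ++ cs]) := by
  induction cs with
  | nil =>
      intro tree maxNode cur done t hInv _
      simpa using hInv
  | cons c cs ih =>
      intro tree maxNode cur done t hInv hr
      obtain ⟨hI, hR⟩ := pvBuildChar_inv c hInv hr
      have := ih (pvBuildChar (tree, maxNode, cur) c).1 (pvBuildChar (tree, maxNode, cur) c).2.1
        (pvBuildChar (tree, maxNode, cur) c).2.2 done (t ++ [c]) hI hR
      simpa [List.foldl_cons, List.append_assoc] using this

-- the whole build: the final tree satisfies the invariant for the full pattern list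
lemma pvInv_empty : pvInv PySem.Dict.empty 0 [] := by
  have hre : ∀ s : List Char, pvReach PySem.Dict.empty s = if s = [] then some 0 else none := by
    intro s
    cases s with
    | nil => rfl
    | cons c u =>
        have : pvReach PySem.Dict.empty (c :: u) = u.foldl (pvStepT PySem.Dict.empty) none := by
          simp [pvReach, List.foldl_cons, pvStepT, PySem.Dict.get?_empty]
        simp [this, foldl_stepT_none]
  refine ⟨?_, ?_, ?_, ?_, ?_⟩
  · intro s
    rw [hre s]
    rcases eq_or_ne s [] with rfl | hs
    · simp [pvNode]
    · simp [hs, pvNode]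
  · intro s id hrs
    rw [hre s] at hrs
    rcases eq_or_ne s [] with rfl | hs
    · simp [PySem.Dict.get?_empty, pvChild]
    · rw [if_neg hs] at hrs
      cases hrs
  · intro s id hrs
    rw [hre s] at hrs
    rcases eq_or_ne s [] with rfl | hs
    · simp at hrs
      omega
    · rw [if_neg hs] at hrs
      cases hrs
  · intro s s2 id hs hs2
    rw [hre s] at hs
    rw [hre s2] at hs2
    rcases eq_or_ne s [] with rfl | h1
    · rcases eq_or_ne s2 [] with rfl | h2
      · rfl
      · rw [if_neg h2] at hs2
        cases hs2
    · rw [if_neg h1] at hs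
      cases hs
  · intro id hsome
    simp [PySem.Dict.get?_empty] at hsome

lemma pvBuildPats_inv (ps : List String) : ∀ (done : List (List Char)) (tree : PvTrie) (maxNode : Int),
    pvInv tree maxNode done →
    pvInv (ps.foldl (fun st p =>
        let r := p.toList.foldl pvBuildChar (st.1, st.2, 0)
        (r.1, r.2.1)) (tree, maxNode)).1
      (ps.foldl (fun st p =>
        let r := p.toList.foldl pvBuildChar (st.1, st.2, 0)
        (r.1, r.2.1)) (tree, maxNode)).2
      (done ++ ps.map String.toList) := by
  induction ps with
  | nil =>
      intro done tree maxNode hInv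
      simpa using hInv
  | cons p ps ih =>
      intro done tree maxNode hInv
      have hInv' : pvInv tree maxNode (done ++ [[]]) :=
        pvInv_congr (fun s => (pvNode_empty_pat done s).symm)
          (fun s => (pvChild_empty_pat done s).symm) hInv
      have hstep := pvBuildChars_inv p.toList tree maxNode 0 done [] hInv' rfl
      simp only [List.nil_append] at hstep
      have := ih (done ++ [p.toList])
        (p.toList.foldl pvBuildChar (tree, maxNode, 0)).1
        (p.toList.foldl pvBuildChar (tree, maxNode, 0)).2.1 hstep
      simpa [List.foldl_cons, List.append_assoc] using this

lemma pvBuildTrie_inv (patterns : List String) :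
    ∃ m, pvInv (pvBuildTrie patterns) m (patterns.map String.toList) := by
  refine ⟨(patterns.foldl (fun st p =>
      let r := p.toList.foldl pvBuildChar (st.1, st.2, 0)
      (r.1, r.2.1)) (PySem.Dict.empty, 0)).2, ?_⟩
  have := pvBuildPats_inv patterns [] PySem.Dict.empty 0 pvInv_empty
  simpa [pvBuildTrie] using this

-- once the walk has left the trie (leaf), the rest of the loop does nothing
lemma pvMatch_leaf {tree : PvTrie} {cur : Int} (h : tree.get? cur = none) :
    ∀ cs, pvMatch tree cs cur = true := by
  intro cs
  induction cs with
  | nil => rfl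
  | cons c rest ih =>
      cases rest with
      | nil => simp [pvMatch, h]
      | cons r rs => simpa [pvMatch, h] using ih

-- the trie walk succeeds iff some prefix extension of s is a childless node
lemma pvMatch_iff {tree : PvTrie} {maxNode : Int} {P : List (List Char)}
    (hInv : pvInv tree maxNode P) :
    ∀ (cs : List Char) (s : List Char) (cur : Int), cs ≠ [] →
      pvReach tree s = some cur →
      (pvMatch tree cs cur = true ↔
        ∃ k ≤ cs.length, pvNode P (s ++ cs.take k) ∧ ¬ pvChild P (s ++ cs.take k)) := by
  obtain ⟨h1, h2, h3, h4, h5⟩ := hInv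
  intro cs
  induction cs with
  | nil => intro s cur h; exact absurd rfl h
  | cons c rest ih =>
      intro s cur _ hr
      have hnode_s : pvNode P s := (h1 s).mp (by simp [hr])
      cases htc : tree.get? cur with
      | none =>
          have hnc : ¬ pvChild P s := by
            rw [← h2 s cur hr]
            simp [htc]
          refine iff_of_true (pvMatch_leaf htc _) ⟨0, by omega, ?_, ?_⟩
          · simpa using hnode_s
          · simpa using hnc
      | some d =>
          have hcs : pvChild P s := (h2 s cur hr).mp (by simp [htc])
          cases hdc : d.get? c with
          | none =>
              have hreach_none : pvReach tree (s ++ [c]) = none := by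
                rw [pvReach_append, hr]
                simp [pvStepT, htc, hdc]
              have hfalse : pvMatch tree (c :: rest) cur = false := by
                cases rest <;> simp [pvMatch, htc, hdc]
              rw [hfalse]
              constructor
              · intro h; cases h
              · rintro ⟨k, hk, hn, hc2⟩
                exfalso
                cases k with
                | zero => exact hc2 (by simpa using hcs)
                | succ k' =>
                    have hpre : s ++ [c] <+: s ++ (c :: rest).take (k' + 1) := by
                      rw [List.take_succ_cons]
                      exact ⟨List.take k' rest, by simp⟩
                    have : pvNode P (s ++ [c]) := pvNode_of_prefix hpre hn
                    have := (h1 (s ++ [c])).mpr this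
                    simp [hreach_none] at this
          | some nxt =>
              have hreach_c : pvReach tree (s ++ [c]) = some nxt := by
                rw [pvReach_append, hr]
                simp [pvStepT, htc, hdc]
              have hnode_sc : pvNode P (s ++ [c]) := (h1 _).mp (by simp [hreach_c])
              have hch : (tree.get? nxt).isSome = true ↔ pvChild P (s ++ [c]) := h2 _ _ hreach_c
              cases rest with
              | nil =>
                  have hL : pvMatch tree [c] cur = !(tree.get? nxt).isSome := by
                    simp [pvMatch, htc, hdc]
                  rw [hL]
                  constructor
                  · intro h
                    refine ⟨1, le_rfl, by simpa using hnode_sc, ?_⟩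
                    simp only [List.take_succ_cons, List.take_nil]
                    rw [← hch]
                    simp at h
                    simp [h]
                  · rintro ⟨k, hk, hn, hc2⟩
                    cases k with
                    | zero => exact absurd (by simpa using hcs) hc2
                    | succ k' =>
                        simp only [List.take_succ_cons, List.take_nil] at hc2
                        rw [← hch] at hc2
                        simp [Bool.not_eq_true] at hc2 ⊢
                        simp [hc2]
              | cons r rs =>
                  have hL : pvMatch tree (c :: r :: rs) cur = pvMatch tree (r :: rs) nxt := by
                    simp [pvMatch, htc, hdc]
                  rw [hL, ih (s ++ [c]) nxt (by simp) hreach_c]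
                  constructor
                  · rintro ⟨k', hk', hn, hc2⟩
                    refine ⟨k' + 1, by simpa using hk', ?_, ?_⟩
                    · rw [List.take_succ_cons, List.append_cons]
                      exact hn
                    · rw [List.take_succ_cons, List.append_cons]
                      exact hc2
                  · rintro ⟨k, hk, hn, hc2⟩
                    cases k with
                    | zero => exact absurd (by simpa using hcs) hc2
                    | succ k' =>
                        refine ⟨k', by simp only [List.length_cons] at hk ⊢; omega, ?_, ?_⟩
                        · rwa [List.take_succ_cons, List.append_cons] at hn
                        · rwa [List.take_succ_cons, List.append_cons] at hc2

-- childless nodes of the trie are exactly the non-extended candidates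
lemma pvChild_iff_cand (pats : List (List Char)) (x : List Char) :
    pvChild pats x ↔ ∃ q ∈ pats, x.length < q.length ∧ x <+: q := by
  constructor
  · rintro ⟨p, hp, hpre, hne⟩
    refine ⟨p, hp, ?_, hpre⟩
    rcases hpre.length_le.lt_or_eq with h | h
    · exact h
    · exact absurd (hpre.eq_of_length h) hne
  · rintro ⟨q, hq, hlen, hpre⟩
    refine ⟨q, hq, hpre, ?_⟩
    intro he
    rw [he] at hlen
    omega

lemma mem_pvProperPrefixes (pats : List (List Char)) (x : List Char) :
    x ∈ pvProperPrefixes pats ↔ ∃ q ∈ pats, x.length < q.length ∧ x <+: q := by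
  unfold pvProperPrefixes
  rw [PySem.Set.mem_ofList]
  simp only [List.mem_flatMap, List.mem_map, List.mem_range]
  constructor
  · rintro ⟨q, hq, j, hj, rfl⟩
    exact ⟨q, hq, by simp [Nat.min_eq_left (Nat.le_of_lt hj)] ; omega, List.take_prefix j q⟩
  · rintro ⟨q, hq, hlen, hpre⟩
    exact ⟨q, hq, x.length, hlen, (List.prefix_iff_eq_take.mp hpre).symm⟩

lemma mem_pvTerminals (cand : List (List Char)) (x : List Char) :
    x ∈ pvTerminals cand ↔
      x ∈ cand ∧ ¬ ∃ q ∈ cand, x.length < q.length ∧ x <+: q := by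
  unfold pvTerminals
  rw [PySem.Set.mem_ofList, List.mem_filter, ← mem_pvProperPrefixes]
  simp [PySem.Set.contains_iff]

-- on a nonempty pattern list, A's match condition is B's terminal-prefix condition
lemma pvTerminal_iff (pats : List (List Char)) (hne : pats ≠ []) (cs : List Char) :
    (∃ k ≤ cs.length, pvNode pats (cs.take k) ∧ ¬ pvChild pats (cs.take k)) ↔
    ∃ p ∈ pvTerminals pats, p <+: cs := by
  constructor
  · rintro ⟨k, hk, hn, hc⟩
    have hmem : List.take k cs ∈ pats := by
      rcases hn with hx | ⟨p, hp, hpre⟩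
      · -- take k = []: no pattern is strictly extended from the root, and pats ≠ [],
        -- so some pattern equals []
        rw [hx] at hc ⊢
        cases pats with
        | nil => exact absurd rfl hne
        | cons p ps =>
            rcases eq_or_ne p [] with rfl | hp
            · exact List.mem_cons_self
            · exact absurd ⟨p, List.mem_cons_self, List.nil_prefix, fun h => hp h.symm⟩ hc
      · rcases eq_or_ne (List.take k cs) p with he | hne'
        · exact he ▸ hp
        · exact absurd ⟨p, hp, hpre, hne'⟩ hc
    refine ⟨List.take k cs, ?_, List.take_prefix k cs⟩
    rw [mem_pvTerminals]
    refine ⟨hmem, ?_⟩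
    rw [← pvChild_iff_cand]
    exact hc
  · rintro ⟨p, hp, hpre⟩
    rw [mem_pvTerminals] at hp
    obtain ⟨hmem, hterm⟩ := hp
    refine ⟨p.length, hpre.length_le, ?_, ?_⟩
    · rw [← List.prefix_iff_eq_take.mp hpre]
      rcases eq_or_ne p [] with rfl | hpe
      · exact Or.inl rfl
      · exact Or.inr ⟨p, hmem, List.prefix_rfl⟩
    · rw [← List.prefix_iff_eq_take.mp hpre, pvChild_iff_cand]
      exact hterm

-- A's while-loop produces exactly B's filtered range
lemma pvLoop_eq (tree : PvTrie) (txt : List Char) (terms : List (List Char))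
    (hmatch : ∀ i : Nat, i < txt.length →
      (pvMatch tree (txt.drop i) 0 = terms.any (fun p => p.isPrefixOf (txt.drop i)))) :
    ∀ (cs : List Char) (k : Nat), cs = txt.drop k →
      pvLoopA tree cs (k : Int) =
        (PySem.List.pyRange (k : Int) (txt.length : Int) 1).filter
          (fun i => terms.any (fun p => p.isPrefixOf (txt.drop i.toNat))) := by
  intro cs
  induction cs with
  | nil =>
      intro k hcs
      have hlen : txt.length ≤ k := by
        have := congrArg List.length hcs
        simp at this
        omega
      rw [PySem.List.pyRange_one_eq_nil (by exact_mod_cast hlen)]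
      rfl
  | cons c rest ih =>
      intro k hcs
      have hklen : k < txt.length := by
        by_contra h
        have hnil : txt.drop k = [] := List.drop_eq_nil_of_le (by omega)
        rw [hnil] at hcs
        cases hcs
      rw [PySem.List.pyRange_one_cons (by exact_mod_cast hklen), List.filter_cons]
      have hrest : rest = txt.drop (k + 1) := by
        have := congrArg List.tail hcs
        simpa [List.tail_drop] using this
      have hih := ih (k + 1) hrest
      have hcast : ((k + 1 : Nat) : Int) = (k : Int) + 1 := by push_cast; ring
      rw [hcast] at hih
      have hm := hmatch k hklen
      rw [← hcs] at hm
      simp only [pvLoopA, hih, hm]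
      cases hb : terms.any (fun p => p.isPrefixOf (c :: rest)) with
      | false =>
          have hb2 := hb
          rw [hcs] at hb2
          simp [hb2]
      | true =>
          have hb2 := hb
          rw [hcs] at hb2
          simp [hb2]

-- ===== VERDICT (by name: the statements are the Claim_ definitions above) =====
theorem solve_spec : Claim_unchanged_solve := by
  intro text n patterns _
  unfold Spec_solve
  intro hnD
  show solve text n patterns = solve_alt text n patterns
  rcases eq_or_ne patterns [] with rfl | hpats
  · -- no patterns: outside D_ forces text = "" and both sides are []
    have htext : text = "" := by
      by_contra h
      exact hnD ⟨rfl, h⟩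
    subst htext
    rfl
  · have hmapne : patterns.map String.toList ≠ [] := by
      simpa using hpats
    obtain ⟨m, hInv⟩ := pvBuildTrie_inv patterns
    have hmatch : ∀ i : Nat, i < text.toList.length →
        pvMatch (pvBuildTrie patterns) (text.toList.drop i) 0 =
          (pvTerminals (patterns.map String.toList)).any
            (fun p => p.isPrefixOf (text.toList.drop i)) := by
      intro i hi
      have hne : text.toList.drop i ≠ [] := by
        intro h
        rw [List.drop_eq_nil_iff] at h
        omega
      have hiff := pvMatch_iff hInv (text.toList.drop i) [] 0 hne (pvReach_nil _)
      simp only [List.nil_append] at hiff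
      apply Bool.coe_iff_coe.mp
      rw [hiff, pvTerminal_iff _ hmapne]
      simp [List.any_eq_true, List.isPrefixOf_iff_prefix]
    have hloop := pvLoop_eq (pvBuildTrie patterns) text.toList
        (pvTerminals (patterns.map String.toList)) hmatch text.toList 0 (by simp)
    simp only [Nat.cast_zero] at hloop
    show pvLoopA (pvBuildTrie patterns) text.toList 0 = _
    rw [hloop]
    rfl

theorem solve_changed : Claim_changed_solve := by unfold Claim_changed_solve; decide

theorem solve_tight : Claim_exact_solve := by
  intro text n patterns _ hD
  obtain ⟨hpats, htext⟩ := hD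
  subst hpats
  have htl : text.toList ≠ [] := by
    intro h
    apply htext
    have := congrArg String.ofList h
    simpa using this
  have hAlt : solve_alt text n [] = [] := by
    simp [solve_alt, pvTerminals, pvProperPrefixes]
  rw [hAlt]
  show pvLoopA (pvBuildTrie []) text.toList 0 ≠ []
  cases hc : text.toList with
  | nil => exact absurd hc htl
  | cons c rest =>
      have hm : pvMatch (pvBuildTrie []) (c :: rest) 0 = true :=
        pvMatch_leaf (by rfl) _
      simp [pvLoopA, hm]
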